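-- pv_equiv track=rewrite | github.com/luchomame/SentimentAnalysisFinal | Sentiment_Analysis-masterCole/Sentiment_Analysis-master/ml/php/testSent.py | animate
-- ===== SOURCE A (Python) =====
-- def animate(labels):
--     # we're going to use the positive and negative labels received from the classifier
--     xpos = []
--     xneg = []
--     xneutral = []
--     ypos = []
--     yneg = []
--     yneutral = []
--
--     x = 0
--
--     for label in labels:
--         x += 1
--         # npl dates if you wanna make it date graph
--         if label == "pos":
--             xpos.append(x)
--             ypos.append(1)
--         elif label == 'neg':
--             # negative bias? make a negative count as half
--             xneg.append(x)
--             yneg.append(-1)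
--         elif label == 'neutral':
--             xneutral.append(x)
--             yneutral.append(0)
--
--     return xpos, ypos, xneg, yneg, xneutral, yneutral
-- ===== SOURCE B (Python) =====
-- def animate(labels):
--     xpos = [i for i, lab in enumerate(labels, 1) if lab == "pos"]
--     xneg = [i for i, lab in enumerate(labels, 1) if lab == "neg"]
--     xneutral = [i for i, lab in enumerate(labels, 1) if lab == "neutral"]
--     return xpos, [1] * len(xpos), xneg, [-1] * len(xneg), xneutral, [0] * len(xneutral)
-- ===== Notes on version B (the rewrite author's own statement) =====
-- stated objective: alternative
-- what changed: Replaces the single stateful dispatch loop (manual counter, six appended lists) with three independent filtering passes over enumerate(labels, 1), deriving each y-list as a constant repeat from the matching index-list length.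
import Mathlib
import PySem

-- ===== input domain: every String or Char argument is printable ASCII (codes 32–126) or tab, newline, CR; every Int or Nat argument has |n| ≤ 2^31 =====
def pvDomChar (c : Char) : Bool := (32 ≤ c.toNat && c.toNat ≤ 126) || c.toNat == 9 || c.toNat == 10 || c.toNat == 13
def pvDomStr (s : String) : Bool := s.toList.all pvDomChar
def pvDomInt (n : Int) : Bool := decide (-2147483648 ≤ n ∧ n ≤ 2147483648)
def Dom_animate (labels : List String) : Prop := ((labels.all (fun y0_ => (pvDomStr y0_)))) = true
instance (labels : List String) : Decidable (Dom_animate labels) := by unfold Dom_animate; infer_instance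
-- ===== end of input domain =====

-- B replaces A's single stateful dispatch loop with three independent filtering
-- passes over enumerate(labels, 1), deriving each y-list as a constant repeat
-- from the matching index-list length (objective: alternative decomposition).

-- ===== PORT A =====
-- one pass: counter x and six accumulated lists, appending in loop order
def animate (labels : List String) : List Int × List Int × List Int × List Int × List Int × List Int :=
  let s := labels.foldl
    (fun (st : Int × List Int × List Int × List Int × List Int × List Int × List Int) label =>
      let x := st.1 + 1
      let (_, xpos, ypos, xneg, yneg, xneutral, yneutral) := st
      if label == "pos" then (x, xpos ++ [x], ypos ++ [(1 : Int)], xneg, yneg, xneutral, yneutral)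
      else if label == "neg" then (x, xpos, ypos, xneg ++ [x], yneg ++ [(-1 : Int)], xneutral, yneutral)
      else if label == "neutral" then (x, xpos, ypos, xneg, yneg, xneutral ++ [x], yneutral ++ [(0 : Int)])
      else (x, xpos, ypos, xneg, yneg, xneutral, yneutral))
    (0, [], [], [], [], [], [])
  (s.2.1, s.2.2.1, s.2.2.2.1, s.2.2.2.2.1, s.2.2.2.2.2.1, s.2.2.2.2.2.2)

-- ===== PORT B =====
-- [i for i, lab in enumerate(labels, 1) if lab == cat]
def animateCollect (labels : List String) (cat : String) : List Int :=
  ((PySem.List.enumerate labels 1).filter (fun p => p.2 == cat)).map (·.1)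

def animate_alt (labels : List String) : List Int × List Int × List Int × List Int × List Int × List Int :=
  let xpos := animateCollect labels "pos"
  let xneg := animateCollect labels "neg"
  let xneutral := animateCollect labels "neutral"
  (xpos, List.replicate xpos.length 1, xneg, List.replicate xneg.length (-1),
   xneutral, List.replicate xneutral.length 0)

-- ===== PRECONDITION & SPEC =====
def Spec_animate (labels : List String) (out : List Int × List Int × List Int × List Int × List Int × List Int) : Prop := out = animate_alt labels
instance (labels : List String) (out : List Int × List Int × List Int × List Int × List Int × List Int) : Decidable (Spec_animate labels out) := by unfold Spec_animate; infer_instance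

-- ===== CLAIM (what is proved, stated in full; the proofs are below) =====
def Claim_equal_animate : Prop := ∀ (labels : List String), Dom_animate labels → Spec_animate labels (animate labels)

-- ===== LEMMAS AND PROOFS =====
-- collect over a general start index, matching the fold's counter
def collectFrom (labels : List String) (cat : String) (i : Int) : List Int :=
  ((PySem.List.enumerate labels i).filter (fun p => p.2 == cat)).map (·.1)

theorem collectFrom_cons (l : String) (labels : List String) (cat : String) (i : Int) :
    collectFrom (l :: labels) cat i =
      (if l == cat then [i] else []) ++ collectFrom labels cat (i + 1) := by
  by_cases h : l == cat <;>
    simp [collectFrom, PySem.List.enumerate_cons, List.filter_cons, h]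

-- the fold invariant: from counter i and accumulated lists, the fold produces
-- the accumulators extended by the collectFrom results starting at i+1
theorem animate_fold_inv (labels : List String) (i : Int)
    (ap bp an bn au bu : List Int) :
    labels.foldl
      (fun (st : Int × List Int × List Int × List Int × List Int × List Int × List Int) label =>
        let x := st.1 + 1
        let (_, xpos, ypos, xneg, yneg, xneutral, yneutral) := st
        if label == "pos" then (x, xpos ++ [x], ypos ++ [(1 : Int)], xneg, yneg, xneutral, yneutral)
        else if label == "neg" then (x, xpos, ypos, xneg ++ [x], yneg ++ [(-1 : Int)], xneutral, yneutral)
        else if label == "neutral" then (x, xpos, ypos, xneg, yneg, xneutral ++ [x], yneutral ++ [(0 : Int)])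
        else (x, xpos, ypos, xneg, yneg, xneutral, yneutral))
      (i, ap, bp, an, bn, au, bu)
    = (i + labels.length,
       ap ++ collectFrom labels "pos" (i + 1),
       bp ++ List.replicate (collectFrom labels "pos" (i + 1)).length 1,
       an ++ collectFrom labels "neg" (i + 1),
       bn ++ List.replicate (collectFrom labels "neg" (i + 1)).length (-1),
       au ++ collectFrom labels "neutral" (i + 1),
       bu ++ List.replicate (collectFrom labels "neutral" (i + 1)).length 0) := by
  induction labels generalizing i ap bp an bn au bu with
  | nil => simp [collectFrom, PySem.List.enumerate]
  | cons l ls ih =>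
    simp only [List.foldl_cons]
    rw [collectFrom_cons, collectFrom_cons, collectFrom_cons]
    split_ifs with h1 h2 h3 <;>
      simp_all [List.replicate_succ, List.append_assoc] <;> ring

theorem animate_spec : Claim_equal_animate := by
  intro labels _
  show animate labels = animate_alt labels
  have h := animate_fold_inv labels 0 [] [] [] [] [] []
  have hc : ∀ cat, collectFrom labels cat (0 + 1) = animateCollect labels cat := by
    intro cat; simp [collectFrom, animateCollect]
  simp only [animate, h, hc]
  rfl
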